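-- pv_equiv track=rewrite | github.com/KaKaBarros04/small-business-system | backend/app/services/dossier/builder.py | _parse_service_from_notes
-- ===== SOURCE A (Python) =====
-- from typing import Callable, Dict, Any, List, Tuple
--
-- def _parse_service_from_notes(notes: str) -> Dict[str, str]:
--     """
--     Permite guardar morada de serviço dentro do campo notas com tags:
--
--       SERVICE_ADDR: Rua X nº 10
--       SERVICE_PC: 1000-001
--       SERVICE_CITY: Lisboa
--     """
--     if not notes:
--         return {}
--
--     out: Dict[str, str] = {}
--     for raw in str(notes).splitlines():
--         line = raw.strip()
--         u = line.upper()
--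
--         if u.startswith("SERVICE_ADDR:"):
--             out["service_address"] = line.split(":", 1)[1].strip()
--         elif u.startswith("SERVICE_PC:"):
--             out["service_postal_code"] = line.split(":", 1)[1].strip()
--         elif u.startswith("SERVICE_CITY:"):
--             out["service_city"] = line.split(":", 1)[1].strip()
--
--     return {k: v for k, v in out.items() if v}
-- ===== SOURCE B (Python) =====
-- _TAGS = (
--     ("SERVICE_ADDR:", "service_address"),
--     ("SERVICE_PC:", "service_postal_code"),
--     ("SERVICE_CITY:", "service_city"),
-- )
--
--
-- def _parse_service_from_notes(notes: str) -> dict: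
--     """Tag-table version: for each known tag, keep the value of the last
--     tagged line in the notes; drop tags whose value is empty."""
--     if not notes:
--         return {}
--     lines = [raw.strip() for raw in str(notes).splitlines()]
--     result = {}
--     for tag, key in _TAGS:
--         value = ""
--         for line in lines:
--             if line.upper().startswith(tag):
--                 value = line.split(":", 1)[1].strip()
--         if value:
--             result[key] = value
--     return result
-- ===== Notes on version B (the rewrite author's own statement) =====
-- stated objective: alternative
-- what changed: Replaces A's single pass over the lines with a three-way branch chain and a dict accumulator by a tag-table scheme: one loop over the three (tag, key) entries, each keeping the value of the last line starting with that tag; Pre_ excludes notes whose tagged lines first appear out of the canonical ADDR, PC, CITY order, where A and B return the same mapping but with keys listed in different orders (A in dict first-insertion order, B in fixed tag order) — a dict-iteration-order corner.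
import Mathlib
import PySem

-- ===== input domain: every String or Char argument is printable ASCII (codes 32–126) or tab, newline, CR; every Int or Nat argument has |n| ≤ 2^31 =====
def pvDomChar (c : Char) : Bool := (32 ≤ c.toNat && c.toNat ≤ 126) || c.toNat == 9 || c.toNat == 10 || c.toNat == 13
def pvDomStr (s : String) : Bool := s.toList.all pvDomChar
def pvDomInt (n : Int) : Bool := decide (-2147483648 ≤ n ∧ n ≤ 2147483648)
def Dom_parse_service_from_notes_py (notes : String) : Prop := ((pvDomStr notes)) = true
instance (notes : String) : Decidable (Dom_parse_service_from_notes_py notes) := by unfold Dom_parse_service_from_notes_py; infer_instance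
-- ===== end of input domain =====

-- B replaces A's single pass with a branch chain and a dict accumulator by a tag-table scheme:
-- for each of the three tags, one scan of the lines keeps the last tagged value; objective:
-- alternative decomposition, same cost.

-- shared low-level step of both programs: line.split(":", 1)[1].strip().
-- In both programs it is only applied to lines starting (case-insensitively) with a "…:" tag, so the
-- list has an element at index 1 and the '.getD ""' defaults are never taken: exact on all reachable inputs.
def pvAfterColon (line : String) : String :=
  PySem.Str.strip ((PySem.List.pyGet? ((PySem.Str.splitMax? line ":" 1).getD []) 1).getD "")

-- ===== PORT A =====
def parse_service_from_notes_py (notes : String) : List (String × String) :=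
  if notes = "" then []
  else
    let d := (PySem.Str.splitlines notes).foldl (fun d raw =>
      let line := PySem.Str.strip raw
      let u := PySem.Str.upper line
      if PySem.Str.startswith u "SERVICE_ADDR:" then
        d.insert "service_address" (pvAfterColon line)
      else if PySem.Str.startswith u "SERVICE_PC:" then
        d.insert "service_postal_code" (pvAfterColon line)
      else if PySem.Str.startswith u "SERVICE_CITY:" then
        d.insert "service_city" (pvAfterColon line)
      else d) PySem.Dict.empty
    d.items.filter (fun p => p.2 ≠ "")

-- ===== PORT B =====
def pvTags : List (String × String) :=
  [("SERVICE_ADDR:", "service_address"),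
   ("SERVICE_PC:", "service_postal_code"),
   ("SERVICE_CITY:", "service_city")]

-- B builds its result dict with distinct fresh keys only (one loop over the three distinct tags),
-- so the dict is exactly its item list built by appending: ported as a list accumulator.
def parse_service_from_notes_py_alt (notes : String) : List (String × String) :=
  if notes = "" then []
  else
    let lines := (PySem.Str.splitlines notes).map PySem.Str.strip
    pvTags.foldl (fun res p =>
      let value := lines.foldl (fun v line =>
        if PySem.Str.startswith (PySem.Str.upper line) p.1 then pvAfterColon line else v) ""
      if value ≠ "" then res ++ [(p.2, value)] else res) []

-- ===== PRECONDITION & SPEC =====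
-- classifier used only by Pre_: the output key a stripped line is tagged with, if any
def pvTagKey (line : String) : Option String :=
  if PySem.Str.startswith (PySem.Str.upper line) "SERVICE_ADDR:" then some "service_address"
  else if PySem.Str.startswith (PySem.Str.upper line) "SERVICE_PC:" then some "service_postal_code"
  else if PySem.Str.startswith (PySem.Str.upper line) "SERVICE_CITY:" then some "service_city"
  else none

-- Pre_ excludes notes whose tagged lines first appear out of the canonical ADDR, PC, CITY order:
-- there A and B return the same key-value mapping but list the keys in different orders (A in dict
-- first-insertion order, B in the fixed tag order) — a dict-iteration-order corner where either
-- order is defensible.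
def Pre_parse_service_from_notes_py (notes : String) : Prop :=
  (PySem.List.dedup
      (((PySem.Str.splitlines notes).map PySem.Str.strip).filterMap pvTagKey)).Sublist
    ["service_address", "service_postal_code", "service_city"]
instance (notes : String) : Decidable (Pre_parse_service_from_notes_py notes) := by
  unfold Pre_parse_service_from_notes_py; infer_instance

def pvWitness_parse_service_from_notes_py : String :=
  "SERVICE_ADDR: Rua X 10\nSERVICE_PC: 1000-001\nSERVICE_CITY: Lisboa"

def Spec_parse_service_from_notes_py (notes : String) (out : List (String × String)) : Prop := out = parse_service_from_notes_py_alt notes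
instance (notes : String) (out : List (String × String)) : Decidable (Spec_parse_service_from_notes_py notes out) := by unfold Spec_parse_service_from_notes_py; infer_instance

-- ===== CLAIM (what is proved, stated in full; the proofs are below) =====
def Claim_equal_parse_service_from_notes_py : Prop := ∀ (notes : String), Dom_parse_service_from_notes_py notes → Pre_parse_service_from_notes_py notes → Spec_parse_service_from_notes_py notes (parse_service_from_notes_py notes)

-- ===== LEMMAS AND PROOFS =====

-- A's loop body, abbreviated
def pvStepA (d : PySem.Dict String String) (raw : String) : PySem.Dict String String :=
  let line := PySem.Str.strip raw
  let u := PySem.Str.upper line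
  if PySem.Str.startswith u "SERVICE_ADDR:" then
    d.insert "service_address" (pvAfterColon line)
  else if PySem.Str.startswith u "SERVICE_PC:" then
    d.insert "service_postal_code" (pvAfterColon line)
  else if PySem.Str.startswith u "SERVICE_CITY:" then
    d.insert "service_city" (pvAfterColon line)
  else d

-- the (key, value) a stripped line contributes, if any
def pvPair (line : String) : Option (String × String) :=
  (pvTagKey line).map (fun k => (k, pvAfterColon line))

lemma pvStepA_eq (d : PySem.Dict String String) (raw : String) :
    pvStepA d raw =
      match pvPair (PySem.Str.strip raw) with
      | some p => d.insert p.1 p.2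
      | none => d := by
  unfold pvStepA pvPair pvTagKey
  cases h1 : PySem.Str.startswith (PySem.Str.upper (PySem.Str.strip raw)) "SERVICE_ADDR:" <;>
  cases h2 : PySem.Str.startswith (PySem.Str.upper (PySem.Str.strip raw)) "SERVICE_PC:" <;>
  cases h3 : PySem.Str.startswith (PySem.Str.upper (PySem.Str.strip raw)) "SERVICE_CITY:" <;>
    simp only [h1, h2, h3] <;> rfl

lemma pvFoldA_eq (raws : List String) (d : PySem.Dict String String) :
    raws.foldl pvStepA d =
      ((raws.map PySem.Str.strip).filterMap pvPair).foldl (fun d p => d.insert p.1 p.2) d := by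
  induction raws generalizing d with
  | nil => rfl
  | cons r rs ih =>
      rw [List.foldl_cons, List.map_cons, List.filterMap_cons, pvStepA_eq]
      cases h : pvPair (PySem.Str.strip r) with
      | none => exact ih _
      | some p => exact ih _

def pvLast (ps : List (String × String)) (k : String) : String :=
  ((ps.reverse.find? (fun p => p.1 == k)).map Prod.snd).getD ""

lemma pvItems_foldl (ps : List (String × String)) :
    (ps.foldl (fun d p => d.insert p.1 p.2) (PySem.Dict.empty : PySem.Dict String String)).items
      = (PySem.List.dedup (ps.map Prod.fst)).map (fun k => (k, pvLast ps k)) := by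
  induction ps using List.reverseRecOn with
  | nil => rfl
  | append_singleton ps q ih =>
      have hkeys : (ps.foldl (fun d p => d.insert p.1 p.2)
          (PySem.Dict.empty : PySem.Dict String String)).keys
          = PySem.Set.ofList (ps.map Prod.fst) := by
        simpa using PySem.Dict.keys_foldl_insert_key ps Prod.fst (fun d p => p.2) PySem.Dict.empty
      have hlast : ∀ k, pvLast (ps ++ [q]) k = if q.1 = k then q.2 else pvLast ps k := by
        intro k
        simp only [pvLast, List.reverse_append, List.reverse_singleton, List.singleton_append,
          List.find?_cons]
        by_cases h : q.1 = k
        · simp [h]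
        · have hb : (q.1 == k) = false := beq_eq_false_iff_ne.mpr h
          simp [h, hb]
      rw [List.foldl_append]
      simp only [List.foldl_cons, List.foldl_nil]
      rw [PySem.Dict.items_insert]
      by_cases hc : q.1 ∈ ps.map Prod.fst
      · have hcont : (ps.foldl (fun d p => d.insert p.1 p.2)
            (PySem.Dict.empty : PySem.Dict String String)).contains q.1 = true := by
          rw [PySem.Dict.contains_eq_decide_mem_keys, hkeys]
          simp [PySem.Set.mem_ofList, hc]
        rw [if_pos hcont, ih]
        have hdedup : PySem.List.dedup ((ps ++ [q]).map Prod.fst)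
            = PySem.List.dedup (ps.map Prod.fst) := by
          simp only [List.map_append, List.map_cons, List.map_nil, PySem.List.dedup_eq_ofList,
            PySem.Set.ofList_append_singleton]
          exact PySem.Set.add_of_mem (by simpa [PySem.Set.mem_ofList] using hc)
        rw [hdedup, List.map_map]
        apply List.map_congr_left
        intro k _
        simp only [Function.comp]
        rw [hlast k]
        by_cases h : q.1 = k
        · simp [h]
        · have hb : (k == q.1) = false := beq_eq_false_iff_ne.mpr (fun e => h e.symm)
          simp [h, hb]
      · have hcont : (ps.foldl (fun d p => d.insert p.1 p.2)
            (PySem.Dict.empty : PySem.Dict String String)).contains q.1 = false := by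
          rw [PySem.Dict.contains_eq_decide_mem_keys, hkeys]
          simp [PySem.Set.mem_ofList, hc]
        rw [if_neg (by simp [hcont]), ih]
        have hdedup : PySem.List.dedup ((ps ++ [q]).map Prod.fst)
            = PySem.List.dedup (ps.map Prod.fst) ++ [q.1] := by
          simp only [List.map_append, List.map_cons, List.map_nil, PySem.List.dedup_eq_ofList,
            PySem.Set.ofList_append_singleton]
          exact PySem.Set.add_of_not_mem (by simpa [PySem.Set.mem_ofList] using hc)
        rw [hdedup, List.map_append]
        congr 1
        · apply List.map_congr_left
          intro k hk
          have hkmem : k ∈ ps.map Prod.fst := by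
            simpa [PySem.List.mem_dedup] using hk
          have hne : q.1 ≠ k := fun e => hc (e ▸ hkmem)
          rw [hlast k, if_neg hne]
        · simp [hlast q.1]

-- what either side contributes for a key: the last tagged line's value, if nonempty
def pvG (lines : List String) (k : String) : Option (String × String) :=
  match lines.reverse.find? (fun l => pvTagKey l == some k) with
  | some line => if pvAfterColon line ≠ "" then some (k, pvAfterColon line) else none
  | none => none

lemma pvFoldB_generic (g : String × String → Option (String × String))
    (l : List (String × String)) (acc : List (String × String)) :
    l.foldl (fun res x => match g x with | some b => res ++ [b] | none => res) acc
      = acc ++ l.filterMap g := by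
  induction l generalizing acc with
  | nil => simp
  | cons x xs ih =>
      rw [List.foldl_cons, List.filterMap_cons]
      cases h : g x with
      | none => exact ih acc
      | some b => rw [ih (acc ++ [b])]; simp

lemma pvFind_bridge (ls : List String) (k : String) :
    (ls.filterMap pvPair).find? (fun p => p.1 == k)
      = (ls.find? (fun l => pvTagKey l == some k)).bind pvPair := by
  rw [List.find?_filterMap]
  have hpred : (fun a => Option.any (fun p => p.1 == k) (pvPair a))
      = (fun l => pvTagKey l == some k) := by
    funext a
    unfold pvPair
    cases pvTagKey a <;> simp
  rw [hpred]

lemma pvPointwise (lines : List String) (k : String) :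
    pvG lines k =
      if (pvLast (lines.filterMap pvPair) k) ≠ "" then some (k, pvLast (lines.filterMap pvPair) k)
      else none := by
  unfold pvG pvLast
  rw [← List.filterMap_reverse, pvFind_bridge]
  cases h : lines.reverse.find? (fun l => pvTagKey l == some k) with
  | none => simp
  | some line =>
      have hp : pvTagKey line = some k := by
        have := List.find?_some h
        simpa using this
      simp [pvPair, hp]

lemma pvKeys_eq (ls : List String) :
    (ls.filterMap pvPair).map Prod.fst = ls.filterMap pvTagKey := by
  induction ls with
  | nil => rfl
  | cons l ls ih =>
      rw [List.filterMap_cons, List.filterMap_cons]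
      cases h : pvTagKey l with
      | none => rw [show pvPair l = none from by simp [pvPair, h]]; exact ih
      | some k' =>
          rw [show pvPair l = some (k', pvAfterColon l) from by simp [pvPair, h]]
          simp [ih]

lemma pvFilterMap_filter (G : String → Option (String × String)) (H : String → String × String)
    (hpt : ∀ k, G k = if (H k).2 ≠ "" then some (H k) else none) (ks : List String) :
    ks.filterMap G = (ks.map H).filter (fun p => p.2 ≠ "") := by
  induction ks with
  | nil => rfl
  | cons k ks ih =>
      rw [List.filterMap_cons, List.map_cons, List.filter_cons, hpt k]
      by_cases hv : (H k).2 = "" <;> simp [hv, ih]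

-- A's result as a filterMap over its key order
lemma pvA_char (raws : List String) :
    ((raws.foldl pvStepA PySem.Dict.empty).items).filter (fun p => p.2 ≠ "")
      = (PySem.List.dedup ((raws.map PySem.Str.strip).filterMap pvTagKey)).filterMap
          (pvG (raws.map PySem.Str.strip)) := by
  rw [pvFoldA_eq, pvItems_foldl, pvKeys_eq]
  exact (pvFilterMap_filter (pvG (raws.map PySem.Str.strip))
    (fun k => (k, pvLast ((raws.map PySem.Str.strip).filterMap pvPair) k))
    (fun k => pvPointwise (raws.map PySem.Str.strip) k)
    (PySem.List.dedup ((raws.map PySem.Str.strip).filterMap pvTagKey))).symm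

-- no string starts with two different tags
lemma pvDisjStr (u p q : String) (hpq : ¬ (p.toList <+: q.toList)) (hqp : ¬ (q.toList <+: p.toList))
    (h : PySem.Str.startswith u p = true) : PySem.Str.startswith u q = false := by
  by_contra hc
  simp only [Bool.not_eq_false] at hc
  rw [PySem.Str.startswith_eq, PySem.Chars.startswith_iff] at h hc
  rcases List.prefix_or_prefix_of_prefix h hc with h' | h'
  · exact hpq h'
  · exact hqp h'

-- each tag's match predicate is exactly "classified to its key"
lemma pvPred_addr (l : String) :
    PySem.Str.startswith (PySem.Str.upper l) "SERVICE_ADDR:"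
      = (pvTagKey l == some "service_address") := by
  unfold pvTagKey
  split_ifs with h1 h2 h3 <;> simpa using h1

lemma pvPred_pc (l : String) :
    PySem.Str.startswith (PySem.Str.upper l) "SERVICE_PC:"
      = (pvTagKey l == some "service_postal_code") := by
  unfold pvTagKey
  split_ifs with h1 h2 h3
  · simpa using pvDisjStr (PySem.Str.upper l) "SERVICE_ADDR:" "SERVICE_PC:" (by decide) (by decide) h1
  · simpa using h2
  · simpa using h2
  · simpa using h2

lemma pvPred_city (l : String) :
    PySem.Str.startswith (PySem.Str.upper l) "SERVICE_CITY:"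
      = (pvTagKey l == some "service_city") := by
  unfold pvTagKey
  split_ifs with h1 h2 h3
  · simpa using pvDisjStr (PySem.Str.upper l) "SERVICE_ADDR:" "SERVICE_CITY:" (by decide) (by decide) h1
  · simpa using pvDisjStr (PySem.Str.upper l) "SERVICE_PC:" "SERVICE_CITY:" (by decide) (by decide) h2
  · simpa using h3
  · simpa using h3

-- B's inner loop keeps the last matching line's value
lemma pvFoldLast (lines : List String) (p : String → Bool) :
    lines.foldl (fun v l => if p l then pvAfterColon l else v) ""
      = ((lines.reverse.find? p).map pvAfterColon).getD "" := by
  induction lines using List.reverseRecOn with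
  | nil => rfl
  | append_singleton ls x ih =>
      rw [List.foldl_append]
      simp only [List.foldl_cons, List.foldl_nil, List.reverse_append, List.reverse_singleton,
        List.singleton_append, List.find?_cons]
      by_cases h : p x <;> simp [h, ih]

-- B's per-tag contribution
def pvGB (lines : List String) (p : String × String) : Option (String × String) :=
  let value := lines.foldl (fun v line =>
    if PySem.Str.startswith (PySem.Str.upper line) p.1 then pvAfterColon line else v) ""
  if value ≠ "" then some (p.2, value) else none

lemma pvFoldB_fun (lines : List String) :
    (fun (res : List (String × String)) (p : String × String) =>
      let value := lines.foldl (fun v line =>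
        if PySem.Str.startswith (PySem.Str.upper line) p.1 then pvAfterColon line else v) ""
      if value ≠ "" then res ++ [(p.2, value)] else res)
    = fun res p => match pvGB lines p with | some b => res ++ [b] | none => res := by
  funext res p
  unfold pvGB
  by_cases hv : (lines.foldl (fun v line =>
      if PySem.Str.startswith (PySem.Str.upper line) p.1 then pvAfterColon line else v) "") = ""
  · rw [if_neg (by simpa using hv), if_neg (by simpa using hv)]
  · rw [if_pos hv, if_pos hv]

lemma pvGB_eq (lines : List String) (t k : String)
    (hp : ∀ l, PySem.Str.startswith (PySem.Str.upper l) t = (pvTagKey l == some k)) :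
    pvGB lines (t, k) = pvG lines k := by
  unfold pvGB pvG
  have hfun : (fun (v : String) line =>
      if PySem.Str.startswith (PySem.Str.upper line) t then pvAfterColon line else v)
      = (fun v line => if (pvTagKey line == some k) then pvAfterColon line else v) := by
    funext v line
    rw [hp]
  rw [hfun, pvFoldLast lines (fun l => pvTagKey l == some k)]
  cases hf : lines.reverse.find? (fun l => pvTagKey l == some k) with
  | none => simp
  | some line => by_cases hv : pvAfterColon line = "" <;> simp [hv]

-- B's result as a filterMap over the canonical key order
lemma pvB_char (lines : List String) :
    pvTags.foldl (fun res p =>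
      let value := lines.foldl (fun v line =>
        if PySem.Str.startswith (PySem.Str.upper line) p.1 then pvAfterColon line else v) ""
      if value ≠ "" then res ++ [(p.2, value)] else res) []
    = ["service_address", "service_postal_code", "service_city"].filterMap (pvG lines) := by
  rw [pvFoldB_fun, pvFoldB_generic, List.nil_append]
  simp only [pvTags, List.filterMap_cons, List.filterMap_nil,
    pvGB_eq lines _ _ pvPred_addr, pvGB_eq lines _ _ pvPred_pc, pvGB_eq lines _ _ pvPred_city]

-- keys never tagged in the lines contribute nothing
lemma pvG_none (lines : List String) (k : String)
    (hk : k ∉ PySem.List.dedup (lines.filterMap pvTagKey)) : pvG lines k = none := by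
  unfold pvG
  have hfind : lines.reverse.find? (fun l => pvTagKey l == some k) = none := by
    rw [List.find?_eq_none]
    intro l hl
    simp only [beq_iff_eq]
    intro hc
    exact hk (by
      rw [PySem.List.mem_dedup]
      exact List.mem_filterMap.mpr ⟨l, List.mem_reverse.mp hl, hc⟩)
  rw [hfind]

-- filterMap along a sublist when the function vanishes off the sublist
lemma pvFilterMap_sublist {α β : Type} (g : α → Option β) :
    ∀ {l1 l2 : List α}, l1.Sublist l2 → l2.Nodup → (∀ a ∈ l2, a ∉ l1 → g a = none) →
      l2.filterMap g = l1.filterMap g := by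
  intro l1 l2 h
  induction h with
  | slnil => intro _ _; rfl
  | @cons l1 l2 a h ih =>
      intro hnd hnone
      rw [List.filterMap_cons]
      have hna : a ∉ l1 := fun hm => (List.nodup_cons.mp hnd).1 (h.subset hm)
      rw [hnone a (List.mem_cons_self) hna]
      exact ih (List.nodup_cons.mp hnd).2 (fun x hx hnx => hnone x (List.mem_cons_of_mem _ hx) hnx)
  | @cons₂ l1 l2 a h ih =>
      intro hnd hnone
      rw [List.filterMap_cons, List.filterMap_cons]
      have hrec : l2.filterMap g = l1.filterMap g := by
        apply ih (List.nodup_cons.mp hnd).2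
        intro x hx hnx
        have hxa : x ≠ a := fun e => (List.nodup_cons.mp hnd).1 (e ▸ hx)
        exact hnone x (List.mem_cons_of_mem _ hx)
          (fun hm => hnx (by rcases List.mem_cons.mp hm with h' | h' <;> [exact absurd h' hxa; exact h']))
      rw [hrec]

-- ===== VERDICT (by name: the statement is the Claim_ definition above) =====
theorem parse_service_from_notes_py_spec : Claim_equal_parse_service_from_notes_py := by
  intro notes _ hpre
  unfold Pre_parse_service_from_notes_py at hpre
  unfold Spec_parse_service_from_notes_py parse_service_from_notes_py parse_service_from_notes_py_alt
  by_cases h : notes = ""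
  · simp [h]
  · simp only [if_neg h]
    exact (pvA_char (PySem.Str.splitlines notes)).trans
      ((pvFilterMap_sublist (pvG ((PySem.Str.splitlines notes).map PySem.Str.strip)) hpre
          (by decide)
          (fun k _ hk => pvG_none ((PySem.Str.splitlines notes).map PySem.Str.strip) k hk)).symm.trans
        (pvB_char ((PySem.Str.splitlines notes).map PySem.Str.strip)).symm)
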